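-- pv_equiv track=rewrite | github.com/savindumahasen/Billy-With-Personal-Assistant-By-Dynamic-Biz | app.py | is_inappropriate
-- ===== SOURCE A (Python) =====
-- def is_inappropriate(question):
--     """Detect inappropriate or off-topic questions."""
--     inappropriate_keywords = [
--         "sex", "porn", "explicit", "nude", "anal", "sexual", "xxx"
--     ]
--
--     question_lower = question.lower()
--     for keyword in inappropriate_keywords:
--         if keyword in question_lower:
--             return True
--     return False
-- ===== SOURCE B (Python) =====
-- def is_inappropriate(question):
--     """Detect inappropriate or off-topic questions (single left-to-right scan)."""
--     keywords = ("sex", "porn", "explicit", "nude", "anal", "sexual", "xxx")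
--     q = question.lower()
--     for i in range(len(q)):
--         if any(q.startswith(kw, i) for kw in keywords):
--             return True
--     return False
-- ===== Notes on version B (the rewrite author's own statement) =====
-- stated objective: alternative
-- what changed: Replaces seven separate whole-string substring scans (one per keyword) by a single left-to-right pass over the string that checks all keywords as prefixes at each position.
import Mathlib
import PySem

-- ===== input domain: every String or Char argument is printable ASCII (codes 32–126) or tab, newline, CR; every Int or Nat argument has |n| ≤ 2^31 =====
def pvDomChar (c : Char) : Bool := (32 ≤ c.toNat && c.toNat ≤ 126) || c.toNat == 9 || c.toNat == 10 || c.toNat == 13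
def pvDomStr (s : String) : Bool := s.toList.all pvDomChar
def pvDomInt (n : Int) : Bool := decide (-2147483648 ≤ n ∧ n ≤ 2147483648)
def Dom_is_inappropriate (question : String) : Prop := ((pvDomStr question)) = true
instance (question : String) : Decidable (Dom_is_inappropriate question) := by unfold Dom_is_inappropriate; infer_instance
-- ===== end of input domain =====

-- B replaces A's seven per-keyword whole-string substring scans by one left-to-right
-- pass that checks every keyword as a prefix at each start position (alternative, not faster).

-- ===== PORT A =====
-- A: for each keyword in order, test 'keyword in question.lower()'; early return True = List.any.
def pvKeywordsA : List String := ["sex", "porn", "explicit", "nude", "anal", "sexual", "xxx"]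

def is_inappropriate (question : String) : Bool :=
  let question_lower := PySem.Str.lower question
  pvKeywordsA.any (fun keyword => PySem.Str.isIn keyword question_lower)

-- ===== PORT B =====
def pvKeywordsB : List (List Char) :=
  ["sex".toList, "porn".toList, "explicit".toList, "nude".toList, "anal".toList, "sexual".toList, "xxx".toList]

-- B's loop 'for i in range(len(q)): if any(q.startswith(kw, i) …)' as recursion over suffixes of q.
def pvScan (kws : List (List Char)) : List Char → Bool
  | [] => false
  | c :: rest => kws.any (fun kw => PySem.Chars.startswith (c :: rest) kw) || pvScan kws rest

def is_inappropriate_alt (question : String) : Bool :=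
  pvScan pvKeywordsB (PySem.Str.lower question).toList

-- ===== PRECONDITION & SPEC =====
def Spec_is_inappropriate (question : String) (out : Bool) : Prop := out = is_inappropriate_alt question
instance (question : String) (out : Bool) : Decidable (Spec_is_inappropriate question out) := by unfold Spec_is_inappropriate; infer_instance

-- ===== CLAIM (what is proved, stated in full; the proofs are below) =====
def Claim_equal_is_inappropriate : Prop := ∀ (question : String), Dom_is_inappropriate question → Spec_is_inappropriate question (is_inappropriate question)

-- ===== LEMMAS AND PROOFS =====

-- B's scan finds a match iff some keyword is an infix of the scanned list (keywords nonempty).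
theorem pvScan_iff (kws : List (List Char)) (h : ∀ kw ∈ kws, kw ≠ []) :
    ∀ s : List Char, pvScan kws s = true ↔ ∃ kw ∈ kws, kw <:+: s := by
  intro s
  induction s with
  | nil =>
      simp only [pvScan, List.infix_nil]
      constructor
      · intro hf; cases hf
      · rintro ⟨kw, hmem, hkw⟩; exact absurd hkw (h kw hmem)
  | cons c rest ih =>
      simp only [pvScan, Bool.or_eq_true, List.any_eq_true, ih]
      constructor
      · rintro (⟨kw, hmem, hsw⟩ | ⟨kw, hmem, hinf⟩)
        · exact ⟨kw, hmem, List.infix_cons_iff.mpr (Or.inl ((PySem.Chars.startswith_iff _ _).mp hsw))⟩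
        · exact ⟨kw, hmem, List.infix_cons_iff.mpr (Or.inr hinf)⟩
      · rintro ⟨kw, hmem, hinf⟩
        rcases List.infix_cons_iff.mp hinf with hpre | hinf'
        · exact Or.inl ⟨kw, hmem, (PySem.Chars.startswith_iff _ _).mpr hpre⟩
        · exact Or.inr ⟨kw, hmem, hinf'⟩

-- ===== VERDICT (by name: the statement is the Claim_ definition above) =====
theorem is_inappropriate_spec : Claim_equal_is_inappropriate := by
  intro question _
  unfold Spec_is_inappropriate is_inappropriate is_inappropriate_alt
  rw [Bool.eq_iff_iff]
  rw [pvScan_iff pvKeywordsB (by decide)]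
  simp only [List.any_eq_true, PySem.Str.isIn_iff_infix]
  constructor
  · rintro ⟨kw, hmem, hinf⟩
    refine ⟨kw.toList, ?_, hinf⟩
    fin_cases hmem <;> simp [pvKeywordsB]
  · rintro ⟨kw, hmem, hinf⟩
    fin_cases hmem <;> exact ⟨_, by simp [pvKeywordsA], hinf⟩
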